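-- pv_equiv track=rewrite | github.com/ymnseol/problem-solving | programmers/42626-더-맵게/42626_더_맵게.py | solution
-- ===== SOURCE A (Python) =====
-- import heapq
--
-- def solution(scoville, K):
--     heap = scoville
--     heapq.heapify(heap) # min heapify
--
--     cnt = 0
--
--     while len(heap) > 1:
--         cnt += 1
--         first_min = heapq.heappop(heap)
--         second_min = heapq.heappop(heap)
--
--         new_scale = first_min + second_min * 2
--         heapq.heappush(heap, new_scale)
--
--         if heap[0] >= K:
--             return cnt
--
--     return -1
-- ===== SOURCE B (Python) =====
-- def solution(scoville, K):
--     # Sorted-list strategy: sort once, always take the two heads, re-insert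
--     # the mixed value at its sorted position by a linear scan.
--     # (Mutates scoville in place like A, but leaves it sorted rather than
--     # in heap order; the return value is identical.)
--     scoville.sort()
--     cnt = 0
--     while len(scoville) > 1:
--         cnt += 1
--         first = scoville.pop(0)
--         second = scoville.pop(0)
--         new_scale = first + second * 2
--         i = 0
--         while i < len(scoville) and scoville[i] <= new_scale:
--             i += 1
--         scoville.insert(i, new_scale)
--         if scoville[0] >= K:
--             return cnt
--     return -1
-- ===== Notes on version B (the rewrite author's own statement) =====
-- stated objective: alternative
-- what changed: Replaces the binary heap with an ascending sorted list: sort once, take the two smallest as the first two elements, and re-insert the mixed value at its sorted position by a linear scan; equivalence is about the return value (both mutate scoville in place, A leaves heap residue, B a sorted residue).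
import Mathlib
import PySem

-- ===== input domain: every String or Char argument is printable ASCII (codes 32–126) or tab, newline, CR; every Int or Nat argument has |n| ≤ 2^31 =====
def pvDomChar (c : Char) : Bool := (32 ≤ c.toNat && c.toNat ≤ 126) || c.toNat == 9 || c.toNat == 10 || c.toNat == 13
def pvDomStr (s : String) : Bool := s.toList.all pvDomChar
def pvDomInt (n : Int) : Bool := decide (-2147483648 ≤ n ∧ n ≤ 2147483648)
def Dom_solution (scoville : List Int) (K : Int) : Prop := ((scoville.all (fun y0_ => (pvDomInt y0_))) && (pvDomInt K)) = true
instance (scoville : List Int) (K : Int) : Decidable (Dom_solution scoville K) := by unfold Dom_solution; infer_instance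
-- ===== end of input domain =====

-- B replaces A's binary heap by an ascending sorted list (sort once, take the two heads,
-- re-insert the mixed value at its sorted position by a linear scan); same return value.
-- Both Pythons mutate scoville in place (A leaves heap residue, B a sorted residue):
-- the equivalence proved here is about the RETURN value only.

-- ===== PORT A =====
-- A's heapq.heapify/heappop/heappush are stdlib calls, ported by their library contract on
-- the multiset the list holds: heapify rearranges the list (multiset unchanged), heappop
-- returns the current minimum and removes one occurrence of it, heappush adds its element,
-- and heap[0] is the current minimum.  This is exact for every value A's loop observes and
-- returns; only the internal residual ORDER of the mutated list (never returned) differs.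
-- length lemma used by solGo's decreasing_by (must precede the definition)
theorem erase_min_length (l : List Int) (hl : l ≠ []) :
    (l.erase ((PySem.List.min? l (fun x => x)).getD 0)).length = l.length - 1 := by
  obtain ⟨m, hm⟩ := Option.ne_none_iff_exists'.1
    (fun h => hl ((PySem.List.min?_eq_none_iff (xs := l) (key := fun x => x)).1 h))
  rw [hm]
  exact List.length_erase_of_mem (PySem.List.min?_mem hm)

def solGo (heap : List Int) (K : Int) (cnt : Int) : Int :=
  if h : 1 < heap.length then
    -- cnt += 1; first_min = heappop(heap); second_min = heappop(heap)
    let first_min := (PySem.List.min? heap (fun x => x)).getD 0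
    let heap1 := heap.erase first_min
    let second_min := (PySem.List.min? heap1 (fun x => x)).getD 0
    let heap2 := heap1.erase second_min
    -- new_scale = first_min + second_min * 2; heappush(heap, new_scale)
    let heap3 := heap2 ++ [first_min + second_min * 2]
    -- if heap[0] >= K: return cnt
    if K ≤ (PySem.List.min? heap3 (fun x => x)).getD 0 then cnt + 1
    else solGo heap3 K (cnt + 1)
  else -1
termination_by heap.length
decreasing_by
  have h1 : heap.erase ((PySem.List.min? heap (fun x => x)).getD 0) ≠ [] := by
    have := erase_min_length heap (by intro hn; simp [hn] at h)
    intro hn; rw [hn] at this; simp at this; omega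
  have e1 := erase_min_length heap (by intro hn; simp [hn] at h)
  have e2 := erase_min_length _ h1
  simp only [List.length_append, List.length_cons, List.length_nil, e2, e1]
  omega

def solution (scoville : List Int) (K : Int) : Int :=
  -- heap = scoville; heapq.heapify(heap)  (multiset unchanged)
  let heap := scoville
  solGo heap K 0

-- ===== PORT B =====
-- the inner while/insert of Source B: scan past elements ≤ new_scale, insert there
def insSorted (l : List Int) (x : Int) : List Int :=
  match l with
  | [] => [x]
  | y :: t => if y ≤ x then y :: insSorted t x else x :: y :: t

theorem length_insSorted (t : List Int) (x : Int) :
    (insSorted t x).length = t.length + 1 := by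
  induction t with
  | nil => simp [insSorted]
  | cons y t ih => simp only [insSorted]; split <;> simp [ih]

def solAltGo (s : List Int) (K : Int) (cnt : Int) : Int :=
  match s with
  | first :: second :: t =>
      -- cnt += 1; first = pop(0); second = pop(0); insert new_scale at its sorted spot
      let s' := insSorted t (first + second * 2)
      -- if scoville[0] >= K: return cnt
      if K ≤ PySem.List.pyGetD s' 0 0 then cnt + 1 else solAltGo s' K (cnt + 1)
  | _ => -1
termination_by s.length
decreasing_by
  simp [length_insSorted]

def solution_alt (scoville : List Int) (K : Int) : Int :=
  solAltGo (PySem.List.sorted scoville (fun x => x)) K 0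

-- ===== PRECONDITION & SPEC =====
def Spec_solution (scoville : List Int) (K : Int) (out : Int) : Prop := out = solution_alt scoville K
instance (scoville : List Int) (K : Int) (out : Int) : Decidable (Spec_solution scoville K out) := by unfold Spec_solution; infer_instance

-- ===== CLAIM (what is proved, stated in full; the proofs are below) =====
def Claim_equal_solution : Prop := ∀ (scoville : List Int) (K : Int), Dom_solution scoville K → Spec_solution scoville K (solution scoville K)

-- ===== LEMMAS AND PROOFS =====

theorem perm_insSorted (t : List Int) (x : Int) : (insSorted t x).Perm (x :: t) := by
  induction t with
  | nil => simp [insSorted]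
  | cons y t ih =>
      simp only [insSorted]
      split
      · exact (ih.cons y).trans (List.Perm.swap x y t)
      · exact List.Perm.refl _

theorem pairwise_insSorted (t : List Int) (x : Int) (h : t.Pairwise (· ≤ ·)) :
    (insSorted t x).Pairwise (· ≤ ·) := by
  induction t with
  | nil => simp [insSorted]
  | cons y t ih =>
      rw [List.pairwise_cons] at h
      obtain ⟨hy, ht⟩ := h
      simp only [insSorted]
      split
      · rename_i hyx
        rw [List.pairwise_cons]
        refine ⟨fun z hz => ?_, ih ht⟩
        rcases List.mem_cons.1 ((perm_insSorted t x).mem_iff.1 hz) with rfl | hz'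
        · exact hyx
        · exact hy z hz'
      · rename_i hyx
        rw [List.pairwise_cons]
        refine ⟨fun z hz => ?_, List.pairwise_cons.2 ⟨hy, ht⟩⟩
        rcases List.mem_cons.1 hz with rfl | hz'
        · omega
        · have := hy z hz'; omega

-- the first element of a sorted rearrangement is A's "minimum" value
theorem min?_of_perm_sorted {la : List Int} {m : Int} {r : List Int}
    (hp : la.Perm (m :: r)) (hs : (m :: r).Pairwise (· ≤ ·)) :
    PySem.List.min? la (fun x => x) = some m := by
  have hne : la ≠ [] := by
    intro hn; rw [hn] at hp; exact (List.cons_ne_nil m r) hp.nil_eq.symm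
  obtain ⟨m', hm'⟩ := Option.ne_none_iff_exists'.1
    (fun h => hne ((PySem.List.min?_eq_none_iff (xs := la) (key := fun x => x)).1 h))
  have hmem : m' ∈ m :: r := hp.mem_iff.1 (PySem.List.min?_mem hm')
  have h1 : m' ≤ m := PySem.List.min?_isMin hm' m (hp.mem_iff.2 (List.mem_cons_self))
  have h2 : m ≤ m' := by
    rcases List.mem_cons.1 hmem with rfl | h
    · omega
    · exact (List.pairwise_cons.1 hs).1 m' h
  rw [hm', le_antisymm h1 h2]

theorem goEq (n : Nat) :
    ∀ (la lb : List Int) (K cnt : Int), la.length = n → la.Perm lb →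
      lb.Pairwise (· ≤ ·) → solGo la K cnt = solAltGo lb K cnt := by
  induction n using Nat.strong_induction_on with
  | _ n ih =>
    intro la lb K cnt hlen hp hs
    by_cases h : 1 < la.length
    · -- lb has ≥ 2 elements
      have hlb : 1 < lb.length := hp.length_eq ▸ h
      obtain ⟨a, lb', rfl⟩ : ∃ a lb', lb = a :: lb' := by
        cases lb with
        | nil => simp at hlb
        | cons a lb' => exact ⟨a, lb', rfl⟩
      obtain ⟨b, t, rfl⟩ : ∃ b t, lb' = b :: t := by
        cases lb' with
        | nil => simp at hlb
        | cons b t => exact ⟨b, t, rfl⟩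
      -- step-by-step correspondence
      have hmin1 : PySem.List.min? la (fun x => x) = some a := min?_of_perm_sorted hp hs
      have hp1 : (la.erase a).Perm (b :: t) := by
        have := hp.erase a
        rwa [List.erase_cons_head] at this
      have hs1 : (b :: t).Pairwise (· ≤ ·) := (List.pairwise_cons.1 hs).2
      have hmin2 : PySem.List.min? (la.erase a) (fun x => x) = some b :=
        min?_of_perm_sorted hp1 hs1
      have hp2 : ((la.erase a).erase b).Perm t := by
        have := hp1.erase b
        rwa [List.erase_cons_head] at this
      have hp3 : (((la.erase a).erase b) ++ [a + b * 2]).Perm (insSorted t (a + b * 2)) := by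
        refine List.Perm.trans ?_ (perm_insSorted t (a + b * 2)).symm
        exact (hp2.append_right [a + b * 2]).trans (List.perm_append_singleton (a + b * 2) t)
      have hs3 : (insSorted t (a + b * 2)).Pairwise (· ≤ ·) :=
        pairwise_insSorted t (a + b * 2) (List.pairwise_cons.1 hs1).2
      obtain ⟨m, r, hmr⟩ : ∃ m r, insSorted t (a + b * 2) = m :: r := by
        cases hins : insSorted t (a + b * 2) with
        | nil => have := length_insSorted t (a + b * 2); rw [hins] at this; simp at this
        | cons m r => exact ⟨m, r, rfl⟩
      have hmin3 : PySem.List.min? (((la.erase a).erase b) ++ [a + b * 2]) (fun x => x) = some m :=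
        min?_of_perm_sorted (hmr ▸ hp3) (hmr ▸ hs3)
      -- lengths
      have hne : la ≠ [] := by intro hn; simp [hn] at h
      have e1 : (la.erase a).length = la.length - 1 := List.length_erase_of_mem
        (hp.mem_iff.2 (List.mem_cons_self))
      have hbmem : b ∈ la.erase a := hp1.mem_iff.2 (List.mem_cons_self)
      have e2 : ((la.erase a).erase b).length = (la.erase a).length - 1 :=
        List.length_erase_of_mem hbmem
      -- unfold one step of each loop
      have hhead : PySem.List.pyGetD (insSorted t (a + b * 2)) 0 0 = m := by
        rw [hmr]; exact PySem.List.pyGetD_zero_cons m r 0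
      rw [solGo]
      rw [solAltGo.eq_def]
      simp only [h, dif_pos, hmin1, hmin2, Option.getD_some, hmin3, hhead]
      by_cases hK : K ≤ m
      · simp [hK]
      · simp only [if_neg hK]
        refine ih (n - 1) (by omega) _ _ K (cnt + 1) ?_ hp3 hs3
        simp only [List.length_append, List.length_cons, List.length_nil, e2, e1]
        omega
    · -- both loops end: length ≤ 1
      rw [solGo]
      simp only [h, dif_neg, not_false_iff]
      have hlb : ¬ 1 < lb.length := hp.length_eq ▸ h
      cases lb with
      | nil => rw [solAltGo.eq_def]
      | cons x lb' =>
          cases lb' with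
          | nil => rw [solAltGo.eq_def]
          | cons y t => simp at hlb
-- ===== VERDICT (by name: the statement is the Claim_ definition above) =====
theorem solution_spec : Claim_equal_solution := by
  intro scoville K _
  unfold Spec_solution solution solution_alt
  exact goEq scoville.length scoville _ K 0 rfl
    (PySem.List.sorted_perm scoville (fun x => x) false).symm
    (PySem.List.sorted_pairwise scoville (fun x => x))
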